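-- pv_equiv track=rewrite | github.com/aspose-cells-foss/aspose-cells-python | aspose_cells/csv_handler.py | _clean_format_literal
-- ===== SOURCE A (Python) =====
-- def _clean_format_literal(text: str) -> str:
--     """
--     Cleans format literals by removing Excel formatting directives.
--
--     Args:
--         text (str): Raw format text.
--
--     Returns:
--         str: Cleaned literal text.
--     """
--     result = []
--     idx = 0
--     while idx < len(text):
--         ch = text[idx]
--         if ch == '"':
--             idx += 1
--             while idx < len(text) and text[idx] != '"':
--                 result.append(text[idx])
--                 idx += 1
--             idx += 1
--             continue
--         if ch in ('_', '*'):
--             idx += 2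
--             continue
--         if ch == '\\':
--             if idx + 1 < len(text):
--                 result.append(text[idx + 1])
--                 idx += 2
--             else:
--                 idx += 1
--             continue
--         result.append(ch)
--         idx += 1
--     return ''.join(result)
-- ===== SOURCE B (Python) =====
-- import re
--
-- _PAT = re.compile(r'"([^"]*)"?|[_*].?|\\(.?)|(.)', re.DOTALL)
--
--
-- def _repl(m):
--     if m.group(1) is not None:
--         return m.group(1)
--     if m.group(2) is not None:
--         return m.group(2)
--     if m.group(3) is not None:
--         return m.group(3)
--     return ''
--
--
-- def _clean_format_literal(text: str) -> str:
--     """Cleaned literal text via a one-pass regex tokenizer."""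
--     return _PAT.sub(_repl, text)
-- ===== Notes on version B (the rewrite author's own statement) =====
-- stated objective: idiomatic
-- what changed: Replaced the manual index loop with inner character-collecting while by one compiled regex alternation (re.sub with a replacement callback) that tokenizes the text in a single left-to-right scan.
import Mathlib
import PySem

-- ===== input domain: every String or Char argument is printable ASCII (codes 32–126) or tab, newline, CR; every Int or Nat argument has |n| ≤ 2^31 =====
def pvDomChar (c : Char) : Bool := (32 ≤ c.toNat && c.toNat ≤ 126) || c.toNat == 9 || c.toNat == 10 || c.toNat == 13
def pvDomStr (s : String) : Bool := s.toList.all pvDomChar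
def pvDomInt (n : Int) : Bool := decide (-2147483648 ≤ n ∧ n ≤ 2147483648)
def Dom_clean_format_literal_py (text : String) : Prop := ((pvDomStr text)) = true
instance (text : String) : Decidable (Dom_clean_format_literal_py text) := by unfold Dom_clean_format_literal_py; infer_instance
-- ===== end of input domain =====

-- B replaces A's manual index loop by a regex tokenizer (re.sub with an alternation);
-- objective: idiomatic. Equivalence is proved on all strings.

-- ===== PORT A =====
-- inner `while idx < len(text) and text[idx] != '"'` loop: returns (collected chars, rest after the closing quote skip `idx += 1`)
def pvA_quote : List Char → List Char × List Char
  | [] => ([], [])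
  | c :: rest => if c = '"' then ([], rest)
                 else let p := pvA_quote rest; (c :: p.1, p.2)

theorem pvA_quote_len : ∀ l : List Char, (pvA_quote l).2.length ≤ l.length := by
  intro l; induction l with
  | nil => simp [pvA_quote]
  | cons c rest ih =>
    by_cases h : c = '"'
    · simp [pvA_quote, h]
    · simp [pvA_quote, h]; omega

-- the outer while loop of A, recursing on the remaining suffix of the text
def pvA_loop : List Char → List Char
  | [] => []
  | c :: rest =>
    if c = '"' then
      let p := pvA_quote rest
      p.1 ++ pvA_loop p.2
    else if c = '_' ∨ c = '*' then
      pvA_loop (rest.drop 1)          -- idx += 2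
    else if c = '\\' then
      match rest with
      | d :: rest' => d :: pvA_loop rest'   -- append text[idx+1], idx += 2
      | [] => pvA_loop []                    -- idx += 1 at the end
    else
      c :: pvA_loop rest
  termination_by l => l.length
  decreasing_by
    all_goals first
      | (have := pvA_quote_len rest; simp at *; omega)
      | (simp [List.length_drop]; omega)
      | simp
      | (simp; omega)

def clean_format_literal_py (text : String) : String :=
  String.ofList (pvA_loop text.toList)

-- ===== PORT B =====
-- the four alternatives of the regex r'"([^"]*)"?|[_*].?|\\(.?)|(.)' (with DOTALL)
inductive PvTok where
  | quoted : List Char → PvTok    -- "([^"]*)"?   : group 1 = the quoted content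
  | skip : PvTok                  -- [_*].?       : no capturing group matched
  | esc : List Char → PvTok       -- \\(.?)       : group 2 = the escaped char (possibly empty)
  | lit : Char → PvTok            -- (.)          : group 3 = the char itself
deriving DecidableEq, Repr

-- the regex engine's left-to-right non-overlapping scan: lex the text into matches
def pvB_lex : List Char → List PvTok
  | [] => []
  | c :: rest =>
    if c = '"' then
      let content := rest.takeWhile (fun d => d ≠ '"')
      PvTok.quoted content :: pvB_lex ((rest.dropWhile (fun d => d ≠ '"')).drop 1)
    else if c = '_' ∨ c = '*' then
      PvTok.skip :: pvB_lex (rest.drop 1)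
    else if c = '\\' then
      PvTok.esc (rest.take 1) :: pvB_lex (rest.drop 1)
    else
      PvTok.lit c :: pvB_lex rest
  termination_by l => l.length
  decreasing_by
    all_goals first
      | (have := List.length_dropWhile_le (fun d => d ≠ '"') rest; simp at *; omega)
      | (simp [List.length_drop]; omega)
      | simp
      | (simp; omega)

-- the replacement callback _repl
def pvB_repl : PvTok → List Char
  | PvTok.quoted s => s
  | PvTok.skip => []
  | PvTok.esc s => s
  | PvTok.lit c => [c]

def clean_format_literal_py_alt (text : String) : String :=
  String.ofList (((pvB_lex text.toList).map pvB_repl).flatten)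

-- ===== PRECONDITION & SPEC =====
def Spec_clean_format_literal_py (text : String) (out : String) : Prop := out = clean_format_literal_py_alt text
instance (text : String) (out : String) : Decidable (Spec_clean_format_literal_py text out) := by unfold Spec_clean_format_literal_py; infer_instance

-- ===== CLAIM (what is proved, stated in full; the proofs are below) =====
def Claim_equal_clean_format_literal_py : Prop := ∀ (text : String), Dom_clean_format_literal_py text → Spec_clean_format_literal_py text (clean_format_literal_py text)

-- ===== LEMMAS AND PROOFS =====

-- A's hand-written inner quote loop computes exactly what the greedy [^"]* match (plus the optional closing quote) consumes
theorem pvA_quote_eq (l : List Char) :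
    pvA_quote l = (l.takeWhile (fun d => d ≠ '"'), (l.dropWhile (fun d => d ≠ '"')).drop 1) := by
  induction l with
  | nil => simp [pvA_quote]
  | cons c rest ih =>
    by_cases h : c = '"'
    · simp [pvA_quote, List.takeWhile, List.dropWhile, h]
    · simp [pvA_quote, List.takeWhile, List.dropWhile, h, ih]

theorem pvA_eq_pvB : ∀ (n : Nat) (l : List Char), l.length ≤ n →
    pvA_loop l = ((pvB_lex l).map pvB_repl).flatten := by
  intro n
  induction n with
  | zero =>
    intro l hl
    have : l = [] := by cases l <;> simp_all
    subst this; simp [pvA_loop, pvB_lex]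
  | succ n ih =>
    intro l hl
    cases l with
    | nil => simp [pvA_loop, pvB_lex]
    | cons c rest =>
      have hl' : rest.length ≤ n := by simpa using hl
      by_cases h1 : c = '"'
      · subst h1
        have hd := List.length_dropWhile_le (fun d => d ≠ '"') rest
        have hb : ((rest.dropWhile (fun d => d ≠ '"')).drop 1).length ≤ n := by
          rw [List.length_drop]; omega
        have hih := ih _ hb
        rw [pvA_loop.eq_def]
        simp [pvB_lex, pvA_quote_eq, pvB_repl, List.drop_one]
        simpa using hih
      · by_cases h2 : c = '_' ∨ c = '*'
        · have hb : (rest.drop 1).length ≤ n := by rw [List.length_drop]; omega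
          have hih := ih _ hb
          rw [pvA_loop.eq_def]
          simp [pvB_lex, pvB_repl, h1, h2, List.drop_one]
          simpa using hih
        · by_cases h3 : c = '\\'
          · subst h3
            cases rest with
            | nil =>
              rw [pvA_loop.eq_def]
              simp [pvB_lex, pvB_repl, h1]
              rw [pvA_loop.eq_def]
            | cons d rest' =>
              have hb : rest'.length ≤ n := by simp at hl'; omega
              have hih := ih _ hb
              rw [pvA_loop.eq_def]
              simp [pvB_lex, pvB_repl, h1, h2, hih]
          · have hih := ih _ hl'
            rw [pvA_loop.eq_def]
            simp [pvB_lex, pvB_repl, h1, h2, h3, hih]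

-- ===== VERDICT (by name: the statement is the Claim_ definition above) =====
theorem clean_format_literal_py_spec : Claim_equal_clean_format_literal_py := by
  intro text _
  unfold Spec_clean_format_literal_py clean_format_literal_py clean_format_literal_py_alt
  rw [pvA_eq_pvB text.toList.length text.toList le_rfl]
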